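-- pv_equiv track=rewrite | github.com/Uffar201/EGE | Задание 24/24.6.py | usl
-- ===== SOURCE A (Python) =====
-- def usl(a):
--     maxi = 0
--     if a.count('G') < 25:
--         for i in range(len(a) - 1):
--             for j in range(i+1,len(a)):
--                 if a[i] == a[j]:
--                     if abs(i - j) > maxi:
--                         maxi = abs(j - i)
--     return maxi
-- ===== SOURCE B (Python) =====
-- def usl(a):
--     if a.count('G') >= 25:
--         return 0
--     first = {}
--     best = 0
--     for i, c in enumerate(a):
--         if c in first:
--             d = i - first[c]
--             if d > best:
--                 best = d
--         else:
--             first[c] = i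
--     return best
-- ===== Notes on version B (the rewrite author's own statement) =====
-- stated objective: faster
-- what changed: Replaced the all-pairs double loop with a single pass that records each character's first index in a dict and maximises current_index - first_index.
import Mathlib
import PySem

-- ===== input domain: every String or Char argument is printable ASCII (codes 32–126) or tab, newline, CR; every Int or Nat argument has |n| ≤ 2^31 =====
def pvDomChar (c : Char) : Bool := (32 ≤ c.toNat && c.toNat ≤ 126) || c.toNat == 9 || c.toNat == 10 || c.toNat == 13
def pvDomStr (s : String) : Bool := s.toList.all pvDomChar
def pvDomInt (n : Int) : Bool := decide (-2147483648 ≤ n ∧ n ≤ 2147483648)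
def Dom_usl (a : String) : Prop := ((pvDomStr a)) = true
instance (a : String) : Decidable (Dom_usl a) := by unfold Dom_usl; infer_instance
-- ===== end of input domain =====

-- B replaces A's all-pairs O(n^2) double loop by one pass keeping each character's
-- first index in a dict and maximising i - first[c] (asymptotically faster).

-- ===== PORT A =====
def usl (a : String) : Int :=
  if (PySem.Str.count a "G" : Int) < 25 then
    (PySem.List.pyRange 0 (PySem.Str.len a - 1) 1).foldl (fun maxi i =>
      (PySem.List.pyRange (i + 1) (PySem.Str.len a) 1).foldl (fun maxi j =>
        if PySem.Str.pyGet? a i == PySem.Str.pyGet? a j then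
          (if |i - j| > maxi then |j - i| else maxi)
        else maxi) maxi) 0
  else 0

-- ===== PORT B =====
def usl_alt (a : String) : Int :=
  if 25 ≤ (PySem.Str.count a "G" : Int) then 0
  else
    ((PySem.List.enumerate a.toList 0).foldl
      (fun (s : PySem.Dict Char Int × Int) p =>
        match PySem.Dict.get? s.1 p.2 with
        | some f => (s.1, if p.1 - f > s.2 then p.1 - f else s.2)
        | none => (s.1.insert p.2 p.1, s.2))
      (PySem.Dict.empty, 0)).2

-- ===== PRECONDITION & SPEC =====
def Spec_usl (a : String) (out : Int) : Prop := out = usl_alt a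
instance (a : String) (out : Int) : Decidable (Spec_usl a out) := by unfold Spec_usl; infer_instance

-- ===== CLAIM (what is proved, stated in full; the proofs are below) =====
def Claim_equal_usl : Prop := ∀ (a : String), Dom_usl a → Spec_usl a (usl a)

-- ===== LEMMAS AND PROOFS =====

-- contribution of position j: j minus the first index of the character at j
def pvCl (l : List Char) (j : Nat) : Int := (j : Int) - (l.idxOf (l.getD j ' ') : Int)

-- running max of contributions over the first k positions
def pvN (l : List Char) (k : Nat) : Int :=
  (List.range k).foldl (fun m j => max m (pvCl l j)) 0

-- generic conditional-max fold
def pvCM (p : α → Bool) (g : α → Int) (xs : List α) (b : Int) : Int :=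
  xs.foldl (fun m x => if p x then max m (g x) else m) b

theorem pvCM_shift (p : α → Bool) (g : α → Int) (xs : List α) (b c : Int) :
    pvCM p g xs (max b c) = max b (pvCM p g xs c) := by
  induction xs generalizing c with
  | nil => rfl
  | cons x t ih =>
      simp only [pvCM, List.foldl_cons]
      by_cases h : p x = true
      · simp only [h, if_pos]
        rw [max_assoc]
        exact ih (max c (g x))
      · simp only [eq_false_of_ne_true h, if_neg Bool.false_ne_true]
        exact ih c

theorem pvCM_le (p : α → Bool) (g : α → Int) (xs : List α) (b K : Int)
    (hb : b ≤ K) (h : ∀ x ∈ xs, p x = true → g x ≤ K) : pvCM p g xs b ≤ K := by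
  induction xs generalizing b with
  | nil => exact hb
  | cons x t ih =>
      simp only [pvCM, List.foldl_cons]
      apply ih
      · by_cases hp : p x = true
        · simp only [hp, if_pos]
          exact max_le hb (h x (by simp) hp)
        · simp only [eq_false_of_ne_true hp, if_neg Bool.false_ne_true]; exact hb
      · intro y hy hpy; exact h y (List.mem_cons_of_mem _ hy) hpy

theorem pvCM_init_le (p : α → Bool) (g : α → Int) (xs : List α) (b : Int) :
    b ≤ pvCM p g xs b := by
  induction xs generalizing b with
  | nil => exact le_refl _
  | cons x t ih =>
      simp only [pvCM, List.foldl_cons]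
      refine le_trans ?_ (ih _)
      by_cases hp : p x = true
      · simp only [hp, if_pos]; exact le_max_left _ _
      · simp only [eq_false_of_ne_true hp, if_neg Bool.false_ne_true]
        exact le_refl _

theorem pvCM_mem_le (p : α → Bool) (g : α → Int) (xs : List α) (b : Int)
    (x : α) (hx : x ∈ xs) (hp : p x = true) : g x ≤ pvCM p g xs b := by
  induction xs generalizing b with
  | nil => cases hx
  | cons y t ih =>
      simp only [pvCM, List.foldl_cons]
      rcases List.mem_cons.mp hx with h | h
      · subst h
        refine le_trans ?_ (pvCM_init_le _ _ _ _)
        simp only [hp, if_pos]; exact le_max_right _ _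
      · exact ih _ h

-- first-index lemmas about List.idxOf
theorem pvIdxOf_le (l : List Char) (c : Char) : ∀ (k : Nat), k < l.length → l[k]! = c → l.idxOf c ≤ k := by
  induction l with
  | nil => intro k h; simp at h
  | cons x t ih =>
      intro k hk he
      cases k with
      | zero => simp at he; simp [he]
      | succ n =>
          by_cases hx : x = c
          · simp [hx]
          · have hxc : (x == c) = false := beq_eq_false_iff_ne.mpr hx
            have := ih n (by simpa using hk) (by simpa using he)
            simp only [List.idxOf_cons, hxc, cond_false]
            omega

theorem pvIdxOf_eq (l : List Char) (c : Char) : ∀ (k : Nat), k < l.length → l[k]! = c → c ∉ l.take k → l.idxOf c = k := by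
  induction l with
  | nil => intro k h; simp at h
  | cons x t ih =>
      intro k hk he hm
      cases k with
      | zero => simp at he; simp [he]
      | succ n =>
          simp only [List.take_succ_cons, List.mem_cons, not_or] at hm
          have hxc : (x == c) = false := beq_eq_false_iff_ne.mpr (fun h => hm.1 h.symm)
          simp only [List.idxOf_cons, hxc, cond_false]
          rw [ih n (by simpa using hk) (by simpa using he) hm.2]

-- "if x > m then x else m" is max
theorem pvIfMax (m x : Int) : (if x > m then x else m) = max m x := by omega

-- B's loop body over Nat indices
def pvBStep (l : List Char) (s : PySem.Dict Char Int × Int) (j : Nat) : PySem.Dict Char Int × Int :=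
  match PySem.Dict.get? s.1 (l.getD j ' ') with
  | some f => (s.1, if (j : Int) - f > s.2 then (j : Int) - f else s.2)
  | none => (s.1.insert (l.getD j ' ') (j : Int), s.2)

-- loop invariant of B: dict = first index per char of the processed prefix, best = pvN
theorem pvB_inv (l : List Char) : ∀ (k : Nat), k ≤ l.length →
    (∀ ch, ((List.range k).foldl (pvBStep l) (PySem.Dict.empty, 0)).1.get? ch
        = if ch ∈ l.take k then some ((l.idxOf ch : Nat) : Int) else none)
    ∧ ((List.range k).foldl (pvBStep l) (PySem.Dict.empty, 0)).2
        = pvCM (fun _ => true) (pvCl l) (List.range k) 0 := by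
  intro k
  induction k with
  | zero => intro _; constructor
            · intro ch; simp [PySem.Dict.empty, PySem.Dict.get?]
            · rfl
  | succ k ih =>
      intro hk1
      have hk : k < l.length := hk1
      obtain ⟨ihd, ihb⟩ := ih (le_of_lt hk)
      have hgetD : l.getD k ' ' = l[k] := List.getD_eq_getElem l ' ' hk
      have htake : l.take (k + 1) = l.take k ++ [l[k]] := by
        rw [List.take_add_one]; simp [List.getElem?_eq_getElem hk]
      have hfold : (List.range (k + 1)).foldl (pvBStep l) (PySem.Dict.empty, 0)
          = pvBStep l ((List.range k).foldl (pvBStep l) (PySem.Dict.empty, 0)) k := by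
        rw [List.range_succ, List.foldl_append, List.foldl_cons, List.foldl_nil]
      have hcm : pvCM (fun _ => true) (pvCl l) (List.range (k + 1)) 0
          = max (pvCM (fun _ => true) (pvCl l) (List.range k) 0) (pvCl l k) := by
        simp only [pvCM, List.range_succ, List.foldl_append, List.foldl_cons, List.foldl_nil, if_pos]
      set r := (List.range k).foldl (pvBStep l) (PySem.Dict.empty, 0) with hr
      by_cases hmem : l[k] ∈ l.take k
      · have hget : r.1.get? (l.getD k ' ') = some ((l.idxOf l[k] : Nat) : Int) := by
          rw [hgetD, ihd l[k], if_pos hmem]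
        have hstep : pvBStep l r k = (r.1, max r.2 ((k : Int) - ((l.idxOf l[k] : Nat) : Int))) := by
          simp only [pvBStep, hget, pvIfMax]
        constructor
        · intro ch
          rw [hfold, hstep]
          show r.1.get? ch = _
          rw [ihd ch]
          by_cases hch : ch ∈ l.take k
          · have h1 : ch ∈ l.take (k + 1) := by rw [htake]; exact List.mem_append_left _ hch
            simp [hch, h1]
          · have hne : ch ≠ l[k] := fun h => hch (h ▸ hmem)
            have h1 : ch ∉ l.take (k + 1) := by
              intro h2; rw [htake] at h2
              rcases List.mem_append.mp h2 with h | h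
              · exact hch h
              · exact hne (by simpa using h)
            simp [hch, h1]
        · rw [hfold, hstep, hcm, ← ihb]
          show max r.2 _ = _
          have : pvCl l k = (k : Int) - ((l.idxOf l[k] : Nat) : Int) := by
            simp only [pvCl, hgetD]
          rw [this]
      · have hget : r.1.get? (l.getD k ' ') = none := by
          rw [hgetD, ihd l[k], if_neg hmem]
        have hidx : l.idxOf l[k] = k :=
          pvIdxOf_eq l l[k] k hk (by rw [getElem!_pos l k hk]) hmem
        rw [hgetD] at hget
        have hstep : pvBStep l r k = (r.1.insert l[k] (k : Int), r.2) := by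
          simp only [pvBStep, hgetD, hget]
        constructor
        · intro ch
          rw [hfold, hstep]
          show (r.1.insert l[k] (k : Int)).get? ch = _
          rw [PySem.Dict.get?_insert, htake]
          by_cases hch : ch = l[k]
          · have h1 : ch ∈ l.take k ++ [l[k]] := by rw [hch]; exact List.mem_append_right _ (by simp)
            rw [if_pos hch, if_pos h1, hch, hidx]
          · rw [if_neg hch, ihd ch]
            by_cases hch2 : ch ∈ l.take k
            · have h1 : ch ∈ l.take k ++ [l[k]] := List.mem_append_left _ hch2
              rw [if_pos hch2, if_pos h1]
            · have h1 : ch ∉ l.take k ++ [l[k]] := by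
                intro h2
                rcases List.mem_append.mp h2 with h | h
                · exact hch2 h
                · exact hch (by simpa using h)
              rw [if_neg hch2, if_neg h1]
        · rw [hfold, hstep, hcm, ← ihb]
          show r.2 = max r.2 (pvCl l k)
          have h0 : pvCl l k = 0 := by simp only [pvCl, hgetD, hidx]; omega
          have hnn : (0 : Int) ≤ r.2 := by rw [ihb]; exact pvCM_init_le _ _ _ _
          rw [h0]; omega

-- the outer loop of A, with a nonnegative accumulator, is a conditional-max fold
theorem pvOuter (xs : List α) (F : Int → α → Int) (g : α → Int)
    (h : ∀ (m : Int) (x : α), 0 ≤ m → x ∈ xs → F m x = max m (g x)) :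
    ∀ (b : Int), 0 ≤ b → xs.foldl F b = pvCM (fun _ => true) g xs b := by
  induction xs with
  | nil => intro b _; rfl
  | cons x t ih =>
      intro b hb
      simp only [List.foldl_cons, pvCM, if_pos]
      rw [h b x hb (by simp)]
      have := ih (fun m x hm hx => h m x hm (List.mem_cons_of_mem _ hx)) (max b (g x)) (le_trans hb (le_max_left _ _))
      simpa [pvCM] using this

theorem pvAlt_eq (a : String) (h : ¬ 25 ≤ (PySem.Str.count a "G" : Int)) :
    usl_alt a = pvCM (fun _ => true) (pvCl a.toList) (List.range a.toList.length) 0 := by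
  have hfold : ((PySem.List.enumerate a.toList 0).foldl
      (fun (s : PySem.Dict Char Int × Int) p =>
        match PySem.Dict.get? s.1 p.2 with
        | some f => (s.1, if p.1 - f > s.2 then p.1 - f else s.2)
        | none => (s.1.insert p.2 p.1, s.2))
      (PySem.Dict.empty, 0))
      = (List.range a.toList.length).foldl (pvBStep a.toList) (PySem.Dict.empty, 0) := by
    rw [PySem.List.enumerate_eq_map_pyRange (d := ' '), List.foldl_map, PySem.List.pyRange_one]
    simp only [PySem.List.len_eq, Int.sub_zero, Int.toNat_natCast, List.foldl_map, zero_add,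
      PySem.List.pyGetD_natCast]
    rfl
  simp only [usl_alt, if_neg h, hfold]
  exact (pvB_inv a.toList a.toList.length le_rfl).2

theorem pvA_eq (a : String) (h : (PySem.Str.count a "G" : Int) < 25) :
    usl a = pvCM (fun _ => true)
      (fun i => pvCM (fun j => PySem.Str.pyGet? a i == PySem.Str.pyGet? a j)
        (fun j => j - i) (PySem.List.pyRange (i + 1) (PySem.Str.len a) 1) 0)
      (PySem.List.pyRange 0 (PySem.Str.len a - 1) 1) 0 := by
  simp only [usl, if_pos h]
  apply pvOuter
  · intro m i hm hi
    obtain ⟨hi0, hi1⟩ := (PySem.List.mem_pyRange_one).mp hi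
    have hcongr : (PySem.List.pyRange (i + 1) (PySem.Str.len a) 1).foldl (fun maxi j =>
        if PySem.Str.pyGet? a i == PySem.Str.pyGet? a j then
          (if |i - j| > maxi then |j - i| else maxi)
        else maxi) m
      = pvCM (fun j => PySem.Str.pyGet? a i == PySem.Str.pyGet? a j)
        (fun j => j - i) (PySem.List.pyRange (i + 1) (PySem.Str.len a) 1) m := by
      apply PySem.List.foldl_congr_mem
      intro acc j hj
      obtain ⟨hj0, hj1⟩ := (PySem.List.mem_pyRange_one).mp hj
      have habs1 : |i - j| = j - i := by
        rw [abs_of_nonpos (by omega : i - j ≤ 0)]; omega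
      have habs2 : |j - i| = j - i := abs_of_nonneg (by omega)
      rw [habs1, habs2, pvIfMax]
    rw [hcongr]
    have hmm : m = max m 0 := by omega
    rw [hmm, pvCM_shift]
    omega
  · exact le_refl 0

theorem pvGetS (a : String) (i : Int) (h0 : 0 ≤ i) :
    PySem.Str.pyGet? a i = a.toList[i.toNat]? := by
  have := PySem.List.pyGet?_of_nonneg (xs := a.toList) (i := i) h0
  simpa using this

theorem usl_spec : Claim_equal_usl := by
  intro a _
  show usl a = usl_alt a
  by_cases hg : (PySem.Str.count a "G" : Int) < 25
  · rw [pvA_eq a hg, pvAlt_eq a (by omega)]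
    have hlen : PySem.Str.len a = (a.toList.length : Int) := by simp
    set l := a.toList with hl
    set n := l.length with hn
    apply le_antisymm
    · -- A ≤ B
      apply pvCM_le
      · exact pvCM_init_le _ _ _ _
      · intro i hi _
        obtain ⟨hi0, hi1⟩ := (PySem.List.mem_pyRange_one).mp hi
        rw [hlen] at hi1
        apply pvCM_le
        · exact pvCM_init_le _ _ _ _
        · intro j hj hpj
          obtain ⟨hj0, hj1⟩ := (PySem.List.mem_pyRange_one).mp hj
          rw [hlen] at hj1
          have hilt : i.toNat < n := by omega
          have hjlt : j.toNat < n := by omega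
          have heq : l[i.toNat]'hilt = l[j.toNat]'hjlt := by
            rw [pvGetS a i hi0, pvGetS a j (by omega)] at hpj
            rw [List.getElem?_eq_getElem hilt, List.getElem?_eq_getElem hjlt] at hpj
            exact Option.some.inj (beq_iff_eq.mp hpj)
          have hcj : l.getD j.toNat ' ' = l[j.toNat]'hjlt := List.getD_eq_getElem l ' ' hjlt
          have hidx : l.idxOf (l.getD j.toNat ' ') ≤ i.toNat := by
            apply pvIdxOf_le l _ i.toNat hilt
            rw [getElem!_pos l i.toNat hilt, hcj, heq]
          have hmemj : j.toNat ∈ List.range n := List.mem_range.mpr hjlt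
          have hb := pvCM_mem_le (fun _ => true) (pvCl l) (List.range n) 0 j.toNat hmemj rfl
          simp only [pvCl] at hb
          omega
    · -- B ≤ A
      apply pvCM_le
      · exact pvCM_init_le _ _ _ _
      · intro k hk _
        have hklt : k < n := List.mem_range.mp hk
        have hck : l.getD k ' ' = l[k]'hklt := List.getD_eq_getElem l ' ' hklt
        have hi0k : l.idxOf (l.getD k ' ') ≤ k := by
          apply pvIdxOf_le l _ k hklt
          rw [getElem!_pos l k hklt, hck]
        set i0 := l.idxOf (l.getD k ' ') with hi0
        by_cases hek : i0 = k
        · have : pvCl l k = 0 := by simp only [pvCl, ← hi0, hek]; omega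
          rw [this]
          exact pvCM_init_le _ _ _ _
        · have hi0lt : i0 < k := by omega
          have hcmem : l.getD k ' ' ∈ l := by rw [hck]; exact List.getElem_mem hklt
          have hi0len : i0 < l.length := List.idxOf_lt_length_of_mem hcmem
          have hli0 : l[i0]'hi0len = l.getD k ' ' := List.getElem_idxOf hi0len
          have hiMem : ((i0 : Nat) : Int) ∈ PySem.List.pyRange 0 (PySem.Str.len a - 1) 1 := by
            rw [PySem.List.mem_pyRange_one, hlen]
            constructor
            · omega
            · omega
          have h1 := pvCM_mem_le (fun _ => true)
            (fun i => pvCM (fun j => PySem.Str.pyGet? a i == PySem.Str.pyGet? a j)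
              (fun j => j - i) (PySem.List.pyRange (i + 1) (PySem.Str.len a) 1) 0)
            (PySem.List.pyRange 0 (PySem.Str.len a - 1) 1) 0 ((i0 : Nat) : Int) hiMem rfl
          have hkMem : ((k : Nat) : Int) ∈ PySem.List.pyRange (((i0 : Nat) : Int) + 1) (PySem.Str.len a) 1 := by
            rw [PySem.List.mem_pyRange_one, hlen]
            constructor
            · omega
            · omega
          have hp : (PySem.Str.pyGet? a ((i0 : Nat) : Int) == PySem.Str.pyGet? a ((k : Nat) : Int)) = true := by
            rw [pvGetS a _ (by positivity), pvGetS a _ (by positivity)]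
            simp only [Int.toNat_natCast]
            rw [List.getElem?_eq_getElem hi0len, List.getElem?_eq_getElem hklt]
            rw [beq_iff_eq, hli0, hck]
          have h2 := pvCM_mem_le (fun j => PySem.Str.pyGet? a ((i0 : Nat) : Int) == PySem.Str.pyGet? a j)
            (fun j => j - ((i0 : Nat) : Int)) (PySem.List.pyRange (((i0 : Nat) : Int) + 1) (PySem.Str.len a) 1) 0
            ((k : Nat) : Int) hkMem hp
          simp only at h1 h2
          simp only [pvCl, ← hi0]
          omega
  · have hg' : 25 ≤ (PySem.Str.count a "G" : Int) := by omega
    simp only [usl, usl_alt, if_neg hg, if_pos hg']
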